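-- pv_equiv track=rewrite | github.com/gueguet/codewars_solution | python/7kyu/im_everywhere.py | has_more_vowels
-- ===== SOURCE A (Python) =====
-- vowels = "aeiouAEIOU"
--
-- def has_more_vowels(word):
--     count_vowels = 0
--     count_con = 0
--     for letter in word:
--         if letter in vowels:
--             count_vowels += 1
--         else:
--             count_con += 1
--     return count_vowels >= count_con
-- ===== SOURCE B (Python) =====
-- vowels = "aeiouAEIOU"
--
-- def has_more_vowels(word):
--     v = 0
--     for ch in vowels:
--         v += word.count(ch)
--     return v >= len(word) - v
-- ===== Notes on version B (the rewrite author's own statement) =====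
-- stated objective: faster
-- what changed: Instead of scanning the word once in Python with a per-character membership test and two counters, B loops over the 10-letter vowel alphabet and sums word.count(ch) per vowel (staged C-level passes over the word, no per-character Python branch), then compares v against len(word) - v.
import Mathlib
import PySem

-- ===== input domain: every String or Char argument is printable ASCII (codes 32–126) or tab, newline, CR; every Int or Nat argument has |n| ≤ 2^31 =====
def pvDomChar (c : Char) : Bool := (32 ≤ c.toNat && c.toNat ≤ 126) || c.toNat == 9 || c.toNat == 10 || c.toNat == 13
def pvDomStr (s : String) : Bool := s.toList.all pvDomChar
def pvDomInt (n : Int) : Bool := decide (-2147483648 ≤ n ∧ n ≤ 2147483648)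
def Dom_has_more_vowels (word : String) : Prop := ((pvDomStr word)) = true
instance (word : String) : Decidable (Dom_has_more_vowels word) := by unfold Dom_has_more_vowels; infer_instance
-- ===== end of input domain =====

-- B loops over the 10-letter vowel alphabet summing word.count(ch) (staged passes), instead of A's single scan with two counters; same result, alternative structure.

-- ===== PORT A =====
-- module constant: vowels = "aeiouAEIOU"
def pvVowels : List Char := "aeiouAEIOU".toList

-- 'letter in vowels' for a single character is element membership in the vowel string
def has_more_vowels (word : String) : Bool :=
  let p := word.toList.foldl
    (fun (st : Nat × Nat) letter =>
      if pvVowels.contains letter then (st.1 + 1, st.2) else (st.1, st.2 + 1))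
    (0, 0)
  decide (p.1 ≥ p.2)

-- ===== PORT B =====
-- 'for ch in vowels: v += word.count(ch)'; iterating a str yields 1-char strings, so word.count(ch) is PySem.Str.count word ch.toString
def has_more_vowels_alt (word : String) : Bool :=
  let v : Int := pvVowels.foldl
    (fun (v : Int) ch => v + (PySem.Str.count word ch.toString : Int)) 0
  decide (v ≥ PySem.Str.len word - v)

-- ===== PRECONDITION & SPEC =====
def Spec_has_more_vowels (word : String) (out : Bool) : Prop := out = has_more_vowels_alt word
instance (word : String) (out : Bool) : Decidable (Spec_has_more_vowels word out) := by unfold Spec_has_more_vowels; infer_instance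

-- ===== CLAIM (what is proved, stated in full; the proofs are below) =====
def Claim_equal_has_more_vowels : Prop := ∀ (word : String), Dom_has_more_vowels word → Spec_has_more_vowels word (has_more_vowels word)

-- ===== LEMMAS AND PROOFS =====

-- A's loop computes (vowel count, length - vowel count)
theorem pv_foldA (l : List Char) (a b : Nat) :
    l.foldl (fun (st : Nat × Nat) letter =>
      if pvVowels.contains letter then (st.1 + 1, st.2) else (st.1, st.2 + 1)) (a, b)
    = (a + l.countP (fun c => pvVowels.contains c),
       b + (l.length - l.countP (fun c => pvVowels.contains c))) := by
  induction l generalizing a b with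
  | nil => simp
  | cons x xs ih =>
    have hle := List.countP_le_length (l := xs) (p := fun c => pvVowels.contains c)
    rw [List.foldl_cons]
    by_cases hx : pvVowels.contains x = true
    · rw [if_pos hx, ih]
      simp only [List.countP_cons, hx, List.length_cons, if_true, Prod.mk.injEq]
      refine ⟨by omega, by omega⟩
    · rw [if_neg hx, ih]
      simp only [List.countP_cons, hx, List.length_cons, Prod.mk.injEq,
        Bool.false_eq_true, if_false]
      refine ⟨by simp, by omega⟩

-- Python str.count for a single-character pattern is the element count
theorem pv_count_go_singleton (c : Char) (l : List Char) (fuel acc : Nat)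
    (h : l.length ≤ fuel) :
    PySem.Chars.count.go [c] fuel l acc = acc + l.count c := by
  induction l generalizing fuel acc with
  | nil => cases fuel <;> simp [PySem.Chars.count.go]
  | cons x xs ih =>
    cases fuel with
    | zero => simp at h
    | succ f =>
      have hf : xs.length ≤ f := by simpa using h
      rw [PySem.Chars.count.go]
      by_cases hx : c = x
      · subst hx
        simp only [List.isPrefixOf, BEq.rfl, Bool.true_and, if_true, List.length_cons,
          List.drop_succ_cons, List.length_nil, List.drop_zero]
        rw [ih f (acc + 1) hf, List.count_cons_self]
        omega
      · have hb : ([c].isPrefixOf (x :: xs)) = false := by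
          simp [List.isPrefixOf, hx]
        rw [hb]
        simp only [Bool.false_eq_true, if_false]
        rw [ih f acc hf, List.count_cons_of_ne (fun h => hx h.symm)]

theorem pv_count_singleton (l : List Char) (c : Char) :
    PySem.Chars.count l [c] = l.count c := by
  rw [PySem.Chars.count]
  simp only [List.isEmpty_cons, Bool.false_eq_true, if_false]
  rw [pv_count_go_singleton c l l.length 0 le_rfl, Nat.zero_add]

-- counting membership in v :: vs splits off count of v when v ∉ vs
theorem pv_countP_cons_contains (v : Char) (vs : List Char) (hv : v ∉ vs) (l : List Char) :
    l.countP (fun c => (v :: vs).contains c)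
      = l.count v + l.countP (fun c => vs.contains c) := by
  induction l with
  | nil => simp
  | cons x xs ih =>
    simp only [List.countP_cons, List.count_cons, List.contains_eq_mem,
      List.mem_cons, ih]
    by_cases hx : x = v <;> by_cases h2 : x ∈ vs <;> simp_all <;> omega

-- for a duplicate-free alphabet, membership count = sum of per-letter counts
theorem pv_countP_eq_sum (vs : List Char) (hnd : vs.Nodup) (l : List Char) :
    (l.countP (fun c => vs.contains c) : Int)
      = (vs.map (fun v => (l.count v : Int))).sum := by
  induction vs with
  | nil => simp
  | cons v vs ih =>
    rcases List.nodup_cons.mp hnd with ⟨hv, hnd'⟩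
    rw [pv_countP_cons_contains v vs hv l, List.map_cons, List.sum_cons, ← ih hnd']
    push_cast
    ring

-- B's fold is the sum of per-letter counts
theorem pv_foldB (word : String) (vs : List Char) (a : Int) :
    vs.foldl (fun (v : Int) ch => v + (PySem.Str.count word ch.toString : Int)) a
      = a + (vs.map (fun v => (word.toList.count v : Int))).sum := by
  induction vs generalizing a with
  | nil => simp
  | cons x xs ih =>
    rw [List.foldl_cons, ih]
    have : PySem.Str.count word x.toString = word.toList.count x := by
      rw [PySem.Str.count_eq]
      have : x.toString.toList = [x] := by simp
      rw [this, pv_count_singleton]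
    rw [this]
    simp only [List.map_cons, List.sum_cons]
    ring

-- ===== VERDICT (by name: the statement is the Claim_ definition above) =====
theorem has_more_vowels_spec : Claim_equal_has_more_vowels := by
  intro word _
  unfold Spec_has_more_vowels has_more_vowels has_more_vowels_alt
  have hnd : pvVowels.Nodup := by decide
  have hle := List.countP_le_length (l := word.toList) (p := fun c => pvVowels.contains c)
  have hsum := pv_countP_eq_sum pvVowels hnd word.toList
  simp only [pv_foldA, Nat.zero_add, pv_foldB, PySem.Str.len_eq, decide_eq_decide]
  rw [← hsum]
  omega
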